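-- pv_equiv track=rewrite | github.com/MarianaAa01/fp-projeto-2 | SegundoProjetoFP.py | obtem_pedras_jogadores
-- ===== SOURCE A (Python) =====
-- def cria_pedra_branca():
--     """
--     cria pedra branca: {} → pedra
--     Esta função devolve uma pedra pertencente ao jogador branco.
--     """
--     return 'O'
--
-- def cria_pedra_preta():
--     """
--     cria pedra preta: {} → pedra
--     Esta função devolve uma pedra pertencente ao jogador preto.
--     """
--     return 'X'
--
-- def cria_pedra_neutra():
--     """
--     cria pedra neutra: {} → pedra
--     Esta função devolve uma pedra neutra.
--     """
--     return '.'
--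
-- def eh_pedra(arg):
--     """
--     eh pedra: universal → booleano
--     Esta função devolve True caso o seu argumento seja um TAD pedra
--     e False caso contrário.
--     """
--     if arg==cria_pedra_branca() or arg==cria_pedra_preta() or arg==cria_pedra_neutra():
--         return True
--     else:
--         return False
--
-- def pedras_iguais(p1, p2):
--     """
--     pedras iguais: universal x universal → booleano
--     Esta função devolve True apenas se p1 e p2 forem pedras e iguais.
--     """
--     if eh_pedra(p1) and eh_pedra(p2) and p1==p2:
--         return True
--     else:
--         return False
--
-- def obtem_pedras_jogadores(g):
--     """
--     obtem pedras jogadores: goban → tuplo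
--     Esta função devolve um tuplo de dois inteiros que correspondem ao
--     número de interseções ocupadas por pedras do jogador branco e preto, respetivamente.
--     """
--     numero_pedras_brancas=0
--     numero_pedras_pretas=0
--     #Percorre-se o goban e por cada peça preta ou branca encontrada adiciona-se uma unidade a um contador.
--     for sublista in g:
--         if pedras_iguais(sublista[1],cria_pedra_preta()):
--             numero_pedras_pretas+=1
--         elif pedras_iguais(sublista[1],cria_pedra_branca()):
--             numero_pedras_brancas+=1
--     return (numero_pedras_brancas, numero_pedras_pretas)
-- ===== SOURCE B (Python) =====
-- def obtem_pedras_jogadores(g):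
--     """Divide and conquer: the stone count of a goban is the pairwise sum of
--     the counts of its two halves; a one-row goban is counted directly."""
--     n = len(g)
--     if n == 0:
--         return (0, 0)
--     if n == 1:
--         s = g[0][1]
--         return (1 if s == 'O' else 0, 1 if s == 'X' else 0)
--     m = n // 2
--     wl, bl = obtem_pedras_jogadores(g[:m])
--     wr, br = obtem_pedras_jogadores(g[m:])
--     return (wl + wr, bl + br)
-- ===== Notes on version B (the rewrite author's own statement) =====
-- stated objective: alternative
-- what changed: Replaces A's single linear pass with two mutating counters by a divide-and-conquer recursion: split the goban at the midpoint, count each half recursively, and add the resulting pairs (correct because the count is additive over concatenation).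
import Mathlib
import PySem

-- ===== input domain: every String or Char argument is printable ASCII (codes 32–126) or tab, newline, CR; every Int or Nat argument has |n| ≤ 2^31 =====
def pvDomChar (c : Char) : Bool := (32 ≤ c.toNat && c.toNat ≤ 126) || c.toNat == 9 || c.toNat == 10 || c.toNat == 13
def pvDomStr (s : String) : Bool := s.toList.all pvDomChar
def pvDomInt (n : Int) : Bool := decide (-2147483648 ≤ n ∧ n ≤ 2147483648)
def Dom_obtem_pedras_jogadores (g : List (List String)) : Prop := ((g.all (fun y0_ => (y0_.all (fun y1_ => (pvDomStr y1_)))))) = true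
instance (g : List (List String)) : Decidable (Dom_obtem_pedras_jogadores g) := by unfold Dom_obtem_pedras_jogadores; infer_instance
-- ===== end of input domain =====

-- B counts by divide and conquer (split at the midpoint, recurse, add the pairs) instead of A's
-- linear two-counter scan; equivalence of return values on rows long enough for sublista[1].

-- ===== PORT A =====
def eh_pedra (arg : String) : Bool :=
  if arg == "O" || arg == "X" || arg == "." then true else false

def pedras_iguais (p1 p2 : String) : Bool :=
  if eh_pedra p1 && eh_pedra p2 && p1 == p2 then true else false

def obtem_pedras_jogadores (g : List (List String)) : Int × Int :=
  -- two counters, updated by a two-way branch per row; sublista[1] exists on Pre_ (getD arbitrary outside)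
  g.foldl
    (fun (acc : Int × Int) sublista =>
      let s := (PySem.List.pyGet? sublista 1).getD ""
      if pedras_iguais s "X" then (acc.1, acc.2 + 1)
      else if pedras_iguais s "O" then (acc.1 + 1, acc.2)
      else acc)
    (0, 0)

-- ===== PORT B =====
def obtem_pedras_jogadores_alt (g : List (List String)) : Int × Int :=
  if g.length = 0 then (0, 0)
  else if g.length = 1 then
    -- g[0][1]; in range on Pre_ (getD arbitrary outside)
    let s := (PySem.List.pyGet? ((PySem.List.pyGet? g 0).getD []) 1).getD ""
    ((if s == "O" then (1 : Int) else 0), (if s == "X" then (1 : Int) else 0))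
  else
    let m : Int := PySem.Int.floordiv (g.length : Int) 2
    let left := obtem_pedras_jogadores_alt (PySem.List.slice g none (some m))
    let right := obtem_pedras_jogadores_alt (PySem.List.slice g (some m) none)
    (left.1 + right.1, left.2 + right.2)
termination_by g.length
decreasing_by
  · have hm : PySem.Int.floordiv (g.length : Int) 2 = ((g.length / 2 : Nat) : Int) := by
      exact_mod_cast PySem.Int.floordiv_natCast g.length 2
    rw [hm, PySem.List.slice_to_natCast]
    simp only [List.length_take]
    omega
  · have hm : PySem.Int.floordiv (g.length : Int) 2 = ((g.length / 2 : Nat) : Int) := by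
      exact_mod_cast PySem.Int.floordiv_natCast g.length 2
    rw [hm, PySem.List.slice_from_natCast]
    simp only [List.length_drop]
    omega

-- ===== PRECONDITION & SPEC =====
-- Pre_ excludes gobans containing a row of fewer than 2 entries, on which sublista[1] raises IndexError in A (and in B).
def Pre_obtem_pedras_jogadores (g : List (List String)) : Prop :=
  ∀ sublista ∈ g, 2 ≤ sublista.length
instance (g : List (List String)) : Decidable (Pre_obtem_pedras_jogadores g) := by unfold Pre_obtem_pedras_jogadores; infer_instance

def pvWitness_obtem_pedras_jogadores : List (List String) := [[".", "O"], ["a", "X", "b"], [".", "."]]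

def Spec_obtem_pedras_jogadores (g : List (List String)) (out : Int × Int) : Prop := out = obtem_pedras_jogadores_alt g
instance (g : List (List String)) (out : Int × Int) : Decidable (Spec_obtem_pedras_jogadores g out) := by unfold Spec_obtem_pedras_jogadores; infer_instance

-- ===== CLAIM (what is proved, stated in full; the proofs are below) =====
def Claim_equal_obtem_pedras_jogadores : Prop := ∀ (g : List (List String)), Dom_obtem_pedras_jogadores g → Pre_obtem_pedras_jogadores g → Spec_obtem_pedras_jogadores g (obtem_pedras_jogadores g)

-- ===== LEMMAS AND PROOFS =====

-- the index-1 projection both versions apply to each row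
def pvProj (sublista : List String) : String := (PySem.List.pyGet? sublista 1).getD ""

lemma pedras_iguais_X (s : String) : pedras_iguais s "X" = (s == "X") := by
  by_cases h : s = "X" <;> simp [pedras_iguais, eh_pedra, h]

lemma pedras_iguais_O (s : String) : pedras_iguais s "O" = (s == "O") := by
  by_cases h : s = "O" <;> simp [pedras_iguais, eh_pedra, h]

def pvStepA (acc : Int × Int) (sublista : List String) : Int × Int :=
  let s := (PySem.List.pyGet? sublista 1).getD ""
  if pedras_iguais s "X" then (acc.1, acc.2 + 1)
  else if pedras_iguais s "O" then (acc.1 + 1, acc.2)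
  else acc

lemma pvStepA_eval (acc : Int × Int) (sublista : List String) :
    pvStepA acc sublista =
      if pvProj sublista = "X" then (acc.1, acc.2 + 1)
      else if pvProj sublista = "O" then (acc.1 + 1, acc.2)
      else acc := by
  simp only [pvStepA, pvProj, pedras_iguais_X, pedras_iguais_O, beq_iff_eq]
  split_ifs <;> rfl

-- A's loop, from any accumulator, adds the counts of "O" / "X" among the projected rows.
lemma pvA_loop (g : List (List String)) (a b : Int) :
    g.foldl pvStepA (a, b)
    = (a + ((g.map pvProj).count "O" : Int), b + ((g.map pvProj).count "X" : Int)) := by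
  induction g generalizing a b with
  | nil => simp
  | cons hd tl ih =>
    rw [List.foldl_cons, pvStepA_eval]
    by_cases hX : pvProj hd = "X"
    · rw [if_pos hX, ih]
      simp [hX]
      ring
    · by_cases hO : pvProj hd = "O"
      · rw [if_neg hX, if_pos hO, ih]
        simp [hO]
        ring
      · rw [if_neg hX, if_neg hO, ih]
        simp [hX, hO]

-- B's divide-and-conquer also computes the counts of "O" / "X" among the projected rows
-- (counts are additive over the take/drop split).
lemma pvB_eval (g : List (List String)) :
    obtem_pedras_jogadores_alt g
    = (((g.map pvProj).count "O" : Int), ((g.map pvProj).count "X" : Int)) := by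
  fun_induction obtem_pedras_jogadores_alt g with
  | case1 g h0 =>
    have : g = [] := List.eq_nil_of_length_eq_zero h0
    subst this; simp
  | case2 g h0 h1 =>
    obtain ⟨row, hg⟩ : ∃ row, g = [row] := by
      match g, h1 with | [row], _ => exact ⟨row, rfl⟩
    subst hg
    show ((if pvProj row == "O" then (1 : Int) else 0),
          (if pvProj row == "X" then (1 : Int) else 0)) = _
    by_cases hO : pvProj row = "O" <;> by_cases hX : pvProj row = "X" <;>
      simp_all
  | case3 g h0 h1 m left right ihl ihr =>
    have hm : m = ((g.length / 2 : Nat) : Int) := by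
      exact_mod_cast PySem.Int.floordiv_natCast g.length 2
    have hsl : PySem.List.slice g none (some m) = g.take (g.length / 2) := by
      rw [hm, PySem.List.slice_to_natCast]
    have hsr : PySem.List.slice g (some m) none = g.drop (g.length / 2) := by
      rw [hm, PySem.List.slice_from_natCast]
    rw [hsl] at ihl; rw [hsr] at ihr
    have hsplit : (g.map pvProj)
        = (g.take (g.length / 2)).map pvProj ++ (g.drop (g.length / 2)).map pvProj := by
      rw [← List.map_append, List.take_append_drop]
    simp only [left, right, hsl, hsr, ihl, ihr, hsplit, List.count_append]
    push_cast; ring_nf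

-- ===== VERDICT (by name: the statement is the Claim_ definition above) =====
theorem obtem_pedras_jogadores_spec : Claim_equal_obtem_pedras_jogadores := by
  intro g _ _
  unfold Spec_obtem_pedras_jogadores
  rw [pvB_eval]
  show List.foldl pvStepA (0, 0) g = _
  rw [pvA_loop]
  simp
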